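-- pv_equiv track=rewrite | github.com/ryanhan1201/Compiler_ChocoPy | pa4-benches/program_170_1.py | fgg
-- ===== SOURCE A (Python) =====
-- def fgg(n: int) -> int:
--     i: int = 0
--     result: int = 1
--
--     while i < n * n * n * n:
--         i = i + 1
--         result = result * 2
--         result = result % 3
--
--     return result
-- ===== SOURCE B (Python) =====
-- def fgg(n: int) -> int:
--     # 2^(n^4) mod 3 = 1 if n^4 even else 2; n^4 has n's parity
--     return 1 + n % 2
-- ===== Notes on version B (the rewrite author's own statement) =====
-- stated objective: faster
-- what changed: Replaced the O(n^4)-iteration doubling loop by the closed form 1 + n % 2 (2^(n^4) mod 3 depends only on the parity of n).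
import Mathlib
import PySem

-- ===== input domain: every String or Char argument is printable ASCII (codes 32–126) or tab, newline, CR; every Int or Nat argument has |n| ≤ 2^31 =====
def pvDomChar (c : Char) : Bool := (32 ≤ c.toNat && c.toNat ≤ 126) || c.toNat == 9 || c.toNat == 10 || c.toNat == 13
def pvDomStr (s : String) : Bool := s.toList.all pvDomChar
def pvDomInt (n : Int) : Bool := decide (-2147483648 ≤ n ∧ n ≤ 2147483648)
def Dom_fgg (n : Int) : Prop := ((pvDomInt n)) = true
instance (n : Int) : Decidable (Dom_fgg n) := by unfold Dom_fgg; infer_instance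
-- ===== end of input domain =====

-- ===== PORT A =====
-- while i < n*n*n*n: i += 1; result = result*2 % 3
def fggLoop (m i result : Int) : Int :=
  if i < m then fggLoop m (i + 1) (result * 2 % 3) else result
termination_by (m - i).toNat
decreasing_by omega

def fgg (n : Int) : Int := fggLoop (n * n * n * n) 0 1

-- ===== PORT B =====
-- closed form: 1 + n % 2 (Python % on positive divisor = Int.emod, i.e. Lean's %)
def fgg_alt (n : Int) : Int := 1 + PySem.Int.mod n 2

-- ===== PRECONDITION & SPEC =====
def Spec_fgg (n : Int) (out : Int) : Prop := out = fgg_alt n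
instance (n : Int) (out : Int) : Decidable (Spec_fgg n out) := by unfold Spec_fgg; infer_instance

-- ===== CLAIM (what is proved, stated in full; the proofs are below) =====
def Claim_equal_fgg : Prop := ∀ (n : Int), Dom_fgg n → Spec_fgg n (fgg n)

-- ===== LEMMAS AND PROOFS =====

-- After k = (m - i).toNat remaining steps starting from r ∈ {1,2},
-- the loop returns r if k is even and 3 - r if k is odd.
theorem fggLoop_parity (k : Nat) : ∀ (m i r : Int), (m - i).toNat = k →
    (r = 1 ∨ r = 2) → fggLoop m i r = if k % 2 = 0 then r else 3 - r := by
  induction k using Nat.strong_induction_on with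
  | _ k ih =>
    intro m i r hk hr
    unfold fggLoop
    by_cases h : i < m
    · have hk' : (m - (i + 1)).toNat = k - 1 := by omega
      have hkpos : 0 < k := by omega
      have hr' : r * 2 % 3 = 3 - r := by rcases hr with h1 | h1 <;> subst h1 <;> decide
      rw [if_pos h, hr', ih (k - 1) (by omega) m (i + 1) (3 - r) hk'
        (by rcases hr with h1 | h1 <;> subst h1 <;> [right; left] <;> norm_num)]
      rcases Nat.even_or_odd k with he | ho
      · have : k % 2 = 0 := Nat.even_iff.mp he
        have : (k - 1) % 2 = 1 := by omega
        simp_all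
      · have : k % 2 = 1 := Nat.odd_iff.mp ho
        have : (k - 1) % 2 = 0 := by omega
        simp_all
    · rw [if_neg h]
      have : k = 0 := by omega
      simp [this]

theorem fgg_spec : Claim_equal_fgg := by
  unfold Claim_equal_fgg Spec_fgg
  intro n _
  have hnn : 0 ≤ n * n * n * n := by nlinarith [sq_nonneg (n*n), sq_nonneg n]
  have h := fggLoop_parity (n * n * n * n).toNat (n * n * n * n) 0 1 (by omega) (Or.inl rfl)
  unfold fgg fgg_alt
  rw [h]
  have hmod : PySem.Int.mod n 2 = n % 2 :=
    PySem.Int.mod_eq_emod_of_pos (by norm_num)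
  rw [hmod]
  -- parity of n^4 equals parity of n
  rcases Int.even_or_odd n with he | ho
  · obtain ⟨c, hc⟩ := he
    have h4 : (n * n * n * n).toNat % 2 = 0 := by
      have : n * n * n * n = 2 * (c * n * n * n) := by rw [hc]; ring
      omega
    have : n % 2 = 0 := by omega
    simp [h4, this]
  · obtain ⟨c, hc⟩ := ho
    have h4 : (n * n * n * n).toNat % 2 = 1 := by
      have hm : n * n = 2 * (2*c*c + 2*c) + 1 := by rw [hc]; ring
      have hs : n * n * n * n = (n*n) * (n*n) := by ring
      have : (n*n) * (n*n) = 2 * (2*(2*c*c+2*c)*(2*c*c+2*c) + 2*(2*c*c+2*c)) + 1 := by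
        rw [hm]; ring
      omega
    have : n % 2 = 1 := by omega
    simp [h4, this]
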